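-- pv_equiv track=rewrite | github.com/Fadsey22/RoomOccupanyDetector | ser.py | untilcom
-- ===== SOURCE A (Python) =====
-- def untilcom(st,dict):
--     val = ""
--     counter = 1
--     for i in range(0,len(st)):
--         if counter > 3:
--             break
--         if st[i] != ',' and st[i] != '\n' and st[i] != '\r':
--             val += st[i]
--         else:
--             dict[counter].append((val))
--             val = ""
--             counter += 1
--     return dict
-- ===== SOURCE B (Python) =====
-- def untilcom(st, dict):
--     seps = [i for i, c in enumerate(st) if c in ',\n\r'][:3]
--     start = 0
--     for k, i in enumerate(seps, 1):
--         dict[k].append(st[start:i])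
--         start = i + 1
--     return dict
-- ===== Notes on version B (the rewrite author's own statement) =====
-- stated objective: alternative
-- what changed: B first collects the positions of the first three separator characters in one enumerate/filter pass and then extracts each field as a slice st[start:i], instead of A's single char-by-char scan that accumulates a field string and a counter with a break.
import Mathlib
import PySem

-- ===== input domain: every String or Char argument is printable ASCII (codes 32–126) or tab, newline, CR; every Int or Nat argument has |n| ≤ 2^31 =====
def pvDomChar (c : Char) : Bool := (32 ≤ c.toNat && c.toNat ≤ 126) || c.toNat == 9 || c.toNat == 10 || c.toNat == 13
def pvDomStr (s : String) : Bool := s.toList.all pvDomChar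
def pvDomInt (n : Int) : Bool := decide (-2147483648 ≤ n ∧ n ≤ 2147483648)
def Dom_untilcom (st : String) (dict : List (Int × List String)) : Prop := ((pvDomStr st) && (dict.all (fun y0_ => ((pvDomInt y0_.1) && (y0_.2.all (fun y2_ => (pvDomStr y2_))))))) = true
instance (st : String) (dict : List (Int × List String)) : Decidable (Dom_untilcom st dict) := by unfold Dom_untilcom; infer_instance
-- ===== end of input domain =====

-- B replaces A's char-by-char scan (field accumulator + counter + break) with a two-pass
-- scheme: collect the first three separator positions, then slice the fields out; objective:
-- alternative (same cost, different traversal). Both A and B mutate dict in place by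
-- appending to its lists; they perform the SAME appends in the same order, and the
-- equivalence proved here is about the returned value.

-- ===== PORT A =====
-- dict[k].append(v) on an association list: append v to the list of the FIRST entry with key k.
-- Exact where k is a key of dict; Python raises KeyError when k is absent (excluded by Pre_).
def pvAppendAt : List (Int × List String) → Int → String → List (Int × List String)
  | [], _, _ => []
  | (k', l) :: rest, k, v =>
    if k' == k then (k', l ++ [v]) :: rest else (k', l) :: pvAppendAt rest k v

def untilcomLoop : List Char → List Char → Int → List (Int × List String) → List (Int × List String)
  | [], _, _, d => d
  | c :: cs, val, counter, d =>
    if counter > 3 then d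
    else if c ≠ ',' ∧ c ≠ '\n' ∧ c ≠ '\r' then
      untilcomLoop cs (val ++ [c]) counter d
    else
      untilcomLoop cs [] (counter + 1) (pvAppendAt d counter (String.ofList val))

def untilcom (st : String) (dict : List (Int × List String)) : List (Int × List String) :=
  untilcomLoop st.toList [] 1 dict

-- ===== PORT B =====
-- seps = [i for i, c in enumerate(st) if c in ',\n\r'][:3]   (membership of a single char in
-- ',\n\r' is exactly c == ',' or c == '\n' or c == '\r'); then
-- for k, i in enumerate(seps, 1): dict[k].append(st[start:i]); start = i + 1.
def untilcom_alt (st : String) (dict : List (Int × List String)) : List (Int × List String) :=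
  ((PySem.List.enumerate
      (PySem.List.slice
        (((PySem.List.enumerate st.toList 0).filter
            (fun p => p.2 == ',' || p.2 == '\n' || p.2 == '\r')).map (fun p => p.1))
        none (some 3))
      1).foldl
    (fun (s : List (Int × List String) × Int) (ki : Int × Int) =>
      (pvAppendAt s.1 ki.1 (PySem.Str.slice st (some s.2) (some ki.2)), ki.2 + 1))
    (dict, 0)).1

-- ===== PRECONDITION & SPEC =====
-- Pre_ excludes exactly the inputs on which Python A raises KeyError: dict must contain each
-- key 1..min(3, number-of-separator-chars of st) that the scan appends to.
def Pre_untilcom (st : String) (dict : List (Int × List String)) : Prop :=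
  ∀ k ∈ List.range (min 3 (st.toList.countP (fun c => c == ',' || c == '\n' || c == '\r'))),
    ((k : Int) + 1) ∈ dict.map Prod.fst
instance (st : String) (dict : List (Int × List String)) : Decidable (Pre_untilcom st dict) := by
  unfold Pre_untilcom; infer_instance

def pvWitness_untilcom : String × (List (Int × List String)) :=
  ("ab,c,\nrest", [(1, []), (2, ["x"]), (3, [])])

def Spec_untilcom (st : String) (dict : List (Int × List String)) (out : List (Int × List String)) : Prop := out = untilcom_alt st dict
instance (st : String) (dict : List (Int × List String)) (out : List (Int × List String)) : Decidable (Spec_untilcom st dict out) := by unfold Spec_untilcom; infer_instance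

-- ===== CLAIM (what is proved, stated in full; the proofs are below) =====
def Claim_equal_untilcom : Prop := ∀ (st : String) (dict : List (Int × List String)), Dom_untilcom st dict → Pre_untilcom st dict → Spec_untilcom st dict (untilcom st dict)

-- ===== LEMMAS AND PROOFS =====

def pvIsSep (c : Char) : Bool := c == ',' || c == '\n' || c == '\r'

-- the list of COMPLETED fields of cs (one per separator; trailing unterminated field dropped)
def pvFields : List Char → List (List Char)
  | [] => []
  | c :: cs => if pvIsSep c then [] :: pvFields cs else (pvFields cs).modifyHead (c :: ·)

-- distribute fields to keys k, k+1, … stopping once the key exceeds 3 (A's break)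
def pvApply : Int → List (Int × List String) → List (List Char) → List (Int × List String)
  | _, d, [] => d
  | k, d, f :: fs => if k > 3 then d else pvApply (k + 1) (pvAppendAt d k (String.ofList f)) fs

def pvPrep (val : List Char) : List (List Char) → List (List Char)
  | [] => []
  | f :: r => (val ++ f) :: r

def pvApplyAll (d : List (Int × List String)) (l : List (Int × List Char)) : List (Int × List String) :=
  l.foldl (fun d p => pvAppendAt d p.1 (String.ofList p.2)) d

def pvSlices (full : List Char) : Int → List Int → List (List Char)
  | _, [] => []
  | s, i :: is => PySem.List.slice full (some s) (some i) :: pvSlices full (i + 1) is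

def pvNatPos : List Char → Nat → List Nat
  | [], _ => []
  | c :: cs, o => if pvIsSep c then o :: pvNatPos cs (o + 1) else pvNatPos cs (o + 1)

def pvCast (l : List Nat) : List Int := l.map (fun n => (n : Int))

lemma pvApply_gt (k : Int) (d : List (Int × List String)) (fs : List (List Char)) (h : k > 3) :
    pvApply k d fs = d := by
  cases fs <;> simp [pvApply, h]

lemma pvPrep_nil (fs : List (List Char)) : pvPrep [] fs = fs := by
  cases fs <;> simp [pvPrep]

lemma loopA_eq (cs : List Char) : ∀ (val : List Char) (counter : Int) (d : List (Int × List String)),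
    untilcomLoop cs val counter d = pvApply counter d (pvPrep val (pvFields cs)) := by
  induction cs with
  | nil => intro val counter d; simp [untilcomLoop, pvFields, pvPrep, pvApply]
  | cons c cs ih =>
    intro val counter d
    by_cases hc : counter > 3
    · simp [untilcomLoop, if_pos hc, pvApply_gt _ _ _ hc]
    · by_cases hs : pvIsSep c
      · have hs' : ¬ (c ≠ ',' ∧ c ≠ '\n' ∧ c ≠ '\r') := by
          simp [pvIsSep] at hs; tauto
        simp only [untilcomLoop, if_neg hc, if_neg hs']
        rw [ih, pvPrep_nil]
        simp [pvFields, hs, pvPrep, pvApply, if_neg hc]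
      · have hs' : c ≠ ',' ∧ c ≠ '\n' ∧ c ≠ '\r' := by
          simp [pvIsSep] at hs; tauto
        simp only [untilcomLoop, if_neg hc, if_pos hs']
        rw [ih]
        congr 1
        simp only [pvFields, hs, Bool.false_eq_true, if_false]
        cases pvFields cs <;> simp [pvPrep, List.modifyHead]

lemma pvNatPos_le (cs : List Char) : ∀ (o : Nat) (p : Nat), p ∈ pvNatPos cs o → o ≤ p := by
  induction cs with
  | nil => intro o p h; simp [pvNatPos] at h
  | cons c cs ih =>
    intro o p h
    by_cases hs : pvIsSep c
    · rw [pvNatPos, if_pos hs] at h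
      rcases List.mem_cons.mp h with rfl | h
      · exact le_refl _
      · exact le_trans (Nat.le_succ o) (ih _ _ h)
    · rw [pvNatPos, if_neg hs] at h
      exact le_trans (Nat.le_succ o) (ih _ _ h)

lemma pvPos_eq (cs : List Char) : ∀ (o : Nat),
    (((PySem.List.enumerate cs (o : Int)).filter
        (fun p => p.2 == ',' || p.2 == '\n' || p.2 == '\r')).map (fun p => p.1))
      = pvCast (pvNatPos cs o) := by
  induction cs with
  | nil => intro o; simp [PySem.List.enumerate_nil, pvNatPos, pvCast]
  | cons c cs ih =>
    intro o
    have hcast : ((o : Int) + 1) = ((o + 1 : Nat) : Int) := by push_cast; ring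
    by_cases hs : pvIsSep c
    · have hs2 : (c == ',' || c == '\n' || c == '\r') = true := by simpa [pvIsSep] using hs
      rw [PySem.List.enumerate_cons, List.filter_cons]
      simp only [hs2, if_pos, List.map_cons, hcast, ih]
      rw [pvNatPos, if_pos hs]
      simp [pvCast]
    · have hs2 : (c == ',' || c == '\n' || c == '\r') = false := by simpa [pvIsSep] using hs
      rw [PySem.List.enumerate_cons, List.filter_cons]
      simp only [hs2, Bool.false_eq_true, if_false, hcast, ih]
      rw [pvNatPos, if_neg hs]

lemma pvCast_nil : pvCast [] = [] := rfl

lemma pvCast_cons (p : Nat) (ps : List Nat) : pvCast (p :: ps) = (p : Int) :: pvCast ps := rfl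

lemma pvSlices_eq_fields (cs : List Char) : ∀ (o : Nat) (full : List Char), full.drop o = cs →
    pvSlices full (o : Int) (pvCast (pvNatPos cs o)) = pvFields cs := by
  induction cs with
  | nil => intro o full _; simp [pvNatPos, pvCast, pvSlices, pvFields]
  | cons c cs ih =>
    intro o full hdrop
    have hdrop' : full.drop (o + 1) = cs := by
      rw [← List.tail_drop, hdrop, List.tail_cons]
    have hcast : ((o : Int) + 1) = ((o + 1 : Nat) : Int) := by push_cast; ring
    by_cases hs : pvIsSep c
    · have h1 : PySem.List.slice full (some (o : Int)) (some (o : Int)) = [] := by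
        rw [PySem.List.slice_natCast]; simp
      rw [pvNatPos, if_pos hs, pvFields, if_pos hs, pvCast_cons]
      simp only [pvSlices]
      rw [h1, hcast, ih _ full hdrop']
    · rw [pvNatPos, if_neg hs, pvFields, if_neg hs]
      have hih := ih (o + 1) full hdrop'
      cases hps : pvNatPos cs (o + 1) with
      | nil =>
        rw [hps, pvCast_nil] at hih
        simp only [pvSlices] at hih
        rw [pvCast_nil]
        simp [pvSlices, ← hih]
      | cons p ps =>
        have hple : o + 1 ≤ p := pvNatPos_le cs (o + 1) p (by rw [hps]; exact List.mem_cons_self ..)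
        rw [hps, pvCast_cons] at hih
        simp only [pvSlices] at hih
        rw [pvCast_cons]
        simp only [pvSlices]
        rw [← hih]
        simp only [List.modifyHead]
        congr 1
        -- slice full o p = c :: slice full (o+1) p
        rw [PySem.List.slice_natCast, PySem.List.slice_natCast, hdrop, hdrop']
        have hsub : p - o = (p - (o + 1)) + 1 := by omega
        rw [hsub]
        simp [List.take_succ_cons]

lemma pvSlices_take (full : List Char) (ps : List Int) : ∀ (s : Int) (n : Nat),
    pvSlices full s (ps.take n) = (pvSlices full s ps).take n := by
  induction ps with
  | nil => intro s n; simp [pvSlices]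
  | cons p ps ih =>
    intro s n
    cases n with
    | zero => simp [pvSlices]
    | succ n => simp [pvSlices, List.take_succ_cons, ih]

lemma pvStrSlice_eq (st : String) (a b : Int) :
    PySem.Str.slice st (some a) (some b) = String.ofList (PySem.List.slice st.toList (some a) (some b)) := rfl

lemma pvFoldB_eq (st : String) : ∀ (ps : List Int) (k : Int) (d : List (Int × List String)) (start : Int),
    ((PySem.List.enumerate ps k).foldl
      (fun (s : List (Int × List String) × Int) (ki : Int × Int) =>
        (pvAppendAt s.1 ki.1 (PySem.Str.slice st (some s.2) (some ki.2)), ki.2 + 1))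
      (d, start)).1
    = pvApplyAll d (PySem.List.enumerate (pvSlices st.toList start ps) k) := by
  intro ps
  induction ps with
  | nil => intro k d start; simp [PySem.List.enumerate_nil, pvSlices, pvApplyAll]
  | cons p ps ih =>
    intro k d start
    simp only [PySem.List.enumerate_cons, List.foldl_cons, pvSlices, pvApplyAll]
    rw [ih]
    simp [pvApplyAll, pvStrSlice_eq]

lemma pvApply_eq_applyAll (fs : List (List Char)) : ∀ (k : Int) (d : List (Int × List String)),
    k ≤ 4 →
    pvApply k d fs = pvApplyAll d (PySem.List.enumerate (fs.take (4 - k).toNat) k) := by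
  induction fs with
  | nil => intro k d _; simp [pvApply, pvApplyAll, PySem.List.enumerate_nil]
  | cons f fs ih =>
    intro k d hk
    by_cases h3 : k > 3
    · have h0 : (4 - k).toNat = 0 := by omega
      simp [pvApply, if_pos h3, h0, pvApplyAll, PySem.List.enumerate_nil]
    · have hsucc : (4 - k).toNat = (4 - (k + 1)).toNat + 1 := by omega
      simp only [pvApply, if_neg h3, hsucc, List.take_succ_cons, PySem.List.enumerate_cons,
        pvApplyAll, List.foldl_cons]
      rw [ih (k + 1) _ (by omega)]
      simp [pvApplyAll]

-- ===== VERDICT (by name: the statement is the Claim_ definition above) =====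
theorem untilcom_spec : Claim_equal_untilcom := by
  intro st dict _ _
  unfold Spec_untilcom untilcom untilcom_alt
  rw [loopA_eq, pvPrep_nil]
  have hp := pvPos_eq st.toList 0
  norm_num at hp
  rw [hp, PySem.List.slice_to _ (by norm_num), pvFoldB_eq, pvSlices_take]
  have hf := pvSlices_eq_fields st.toList 0 st.toList (by simp)
  norm_num at hf
  rw [hf, pvApply_eq_applyAll _ 1 dict (by norm_num)]
  norm_num
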